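-- pv_equiv track=rewrite | github.com/sayambothra/MAANGpractice | DataStructers_and_Algorithms/DynamicProgramming/NumberFactor_TD&BU.py | NumFactTD
-- ===== SOURCE A (Python) =====
-- def NumFactTD(n,dp):
--     if n in(0,1,2):
--         return 1
--     elif n==3:
--         return 2
--     else:
--         if n not in dp:
--             subP1=NumFactTD(n-1,dp)
--             subP2=NumFactTD(n-3,dp)
--             subP3=NumFactTD(n-4,dp)
--             dp[n]=subP1+subP2+subP3
--         return dp[n]
-- ===== SOURCE B (Python) =====
-- # B: iterative bottom-up pass with four rolling values instead of memoized recursion.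
-- # Return-value equivalence only: B does not mutate dp (A fills dp[4..n] for missing keys).
-- def NumFactTD(n, dp):
--     if n in (0, 1, 2):
--         return 1
--     if n == 3:
--         return 2
--     if n in dp:
--         return dp[n]
--     a, b, c, d = 1, 1, 1, 2  # f[k-4], f[k-3], f[k-2], f[k-1] for k = 4
--     for k in range(4, n + 1):
--         v = dp[k] if k in dp else d + b + a
--         a, b, c, d = b, c, d, v
--     return d
-- ===== Notes on version B (the rewrite author's own statement) =====
-- stated objective: alternative
-- what changed: Replaced the memoized top-down recursion over a dict with a single forward loop keeping four rolling values (f[k-4..k-1]), honouring pre-seeded dp entries as overrides; B uses O(1) extra space and no recursion, does not mutate dp, and equivalence is about the return value.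
-- outside the precondition, e.g. on NumFactTD(-1, {-2: 3, -4: 5, -5: 7}): A returns 15, B returns 2
import Mathlib
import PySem

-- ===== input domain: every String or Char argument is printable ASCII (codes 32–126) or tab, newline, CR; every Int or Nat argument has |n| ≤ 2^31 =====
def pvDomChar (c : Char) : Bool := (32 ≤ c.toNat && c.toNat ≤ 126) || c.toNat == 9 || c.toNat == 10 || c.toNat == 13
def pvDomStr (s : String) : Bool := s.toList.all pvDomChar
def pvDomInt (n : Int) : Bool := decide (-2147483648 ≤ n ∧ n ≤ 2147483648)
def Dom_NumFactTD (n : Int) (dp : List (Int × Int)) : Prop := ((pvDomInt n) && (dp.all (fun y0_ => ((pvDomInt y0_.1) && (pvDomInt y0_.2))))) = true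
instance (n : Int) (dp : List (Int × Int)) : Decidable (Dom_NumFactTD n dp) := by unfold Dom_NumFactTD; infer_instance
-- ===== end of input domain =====

-- B replaces A's memoized recursion with one forward loop over four rolling values; A mutates dp
-- (fills missing keys 4..n), B does not — the equivalence proved here is about the RETURN value only.

-- ===== PORT A =====
-- A's recursion, with the mutated dict threaded through (value, updated dict).
-- Indexed by a Nat equal to n (all of A's recursive calls stay ≥ 0 once n ≥ 4).
def NumFactTD_goA : Nat → PySem.Dict Int Int → Int × PySem.Dict Int Int
  | 0, dp => (1, dp)
  | 1, dp => (1, dp)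
  | 2, dp => (1, dp)
  | 3, dp => (2, dp)
  | (k+4), dp =>
    match dp.get? ((k : Int) + 4) with
    | some v => (v, dp)                       -- 'n in dp': return dp[n]
    | none =>
      let r1 := NumFactTD_goA (k+3) dp        -- subP1 = NumFactTD(n-1, dp)
      let r2 := NumFactTD_goA (k+1) r1.2      -- subP2 = NumFactTD(n-3, dp)
      let r3 := NumFactTD_goA k r2.2          -- subP3 = NumFactTD(n-4, dp)
      let dp' := r3.2.insert ((k : Int) + 4) (r1.1 + r2.1 + r3.1)   -- dp[n] = …
      (dp'.getD ((k : Int) + 4) 0, dp')       -- return dp[n] (just inserted: KeyError impossible)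

def NumFactTD (n : Int) (dp : List (Int × Int)) : Int :=
  if n = 0 ∨ n = 1 ∨ n = 2 then 1
  else if n = 3 then 2
  else
    match (PySem.Dict.mk dp).get? n with
    | some v => v                                  -- 'n in dp': return dp[n] without recursing
    | none => (NumFactTD_goA n.toNat (PySem.Dict.mk dp)).1

-- ===== PORT B =====
def NumFactTD_alt (n : Int) (dp : List (Int × Int)) : Int :=
  if n = 0 ∨ n = 1 ∨ n = 2 then 1
  else if n = 3 then 2
  else
    match (PySem.Dict.mk dp).get? n with
    | some v => v
    | none =>
    ((PySem.List.pyRange 4 (n + 1) 1).foldl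
      (fun (st : Int × Int × Int × Int) k =>
        let v := match (PySem.Dict.mk dp).get? k with
                 | some x => x
                 | none => st.2.2.2 + st.2.1 + st.1
        (st.2.1, st.2.2.1, st.2.2.2, v))
      (1, 1, 1, 2)).2.2.2

-- ===== PRECONDITION & SPEC =====
-- Pre_ excludes negative n whose key is not itself in dp: there A's recursion has no base case
-- (RecursionError in general; when pre-seeded negative dp keys happen to ground the recursion, the
-- value A returns is an accidental sum of unrelated dp entries, meaningless for this function).
def Pre_NumFactTD (n : Int) (dp : List (Int × Int)) : Prop := 0 ≤ n ∨ n ∈ dp.map Prod.fst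
instance (n : Int) (dp : List (Int × Int)) : Decidable (Pre_NumFactTD n dp) := by unfold Pre_NumFactTD; infer_instance
def pvWitness_NumFactTD : Int × (List (Int × Int)) := (7, [(5, 9)])

def Spec_NumFactTD (n : Int) (dp : List (Int × Int)) (out : Int) : Prop := out = NumFactTD_alt n dp
instance (n : Int) (dp : List (Int × Int)) (out : Int) : Decidable (Spec_NumFactTD n dp out) := by unfold Spec_NumFactTD; infer_instance

-- ===== CLAIM (what is proved, stated in full; the proofs are below) =====
def Claim_equal_NumFactTD : Prop := ∀ (n : Int) (dp : List (Int × Int)), Dom_NumFactTD n dp → Pre_NumFactTD n dp → Spec_NumFactTD n dp (NumFactTD n dp)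

-- ===== LEMMAS AND PROOFS =====

-- The pure recurrence both sides compute: base 1,1,1,2; pre-seeded dp keys override.
def NumFactTD_gF (dp : PySem.Dict Int Int) : Nat → Int
  | 0 => 1
  | 1 => 1
  | 2 => 1
  | 3 => 2
  | (k+4) =>
    match dp.get? ((k : Int) + 4) with
    | some x => x
    | none => NumFactTD_gF dp (k+3) + NumFactTD_gF dp (k+1) + NumFactTD_gF dp k

-- dp' extends dp0 only by correct memo entries at keys ≥ 4.
def NumFactTD_Ext (dp0 dp' : PySem.Dict Int Int) : Prop :=
  ∀ j : Int, dp'.get? j = dp0.get? j ∨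
    (dp0.get? j = none ∧ 4 ≤ j ∧ dp'.get? j = some (NumFactTD_gF dp0 j.toNat))

theorem NumFactTD_goA_spec (dp0 : PySem.Dict Int Int) :
    ∀ (k : Nat) (dp' : PySem.Dict Int Int), NumFactTD_Ext dp0 dp' →
      (NumFactTD_goA k dp').1 = NumFactTD_gF dp0 k ∧ NumFactTD_Ext dp0 (NumFactTD_goA k dp').2 := by
  intro k
  induction k using Nat.strong_induction_on with
  | _ k ih =>
    intro dp' hExt
    match k with
    | 0 => exact ⟨rfl, hExt⟩
    | 1 => exact ⟨rfl, hExt⟩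
    | 2 => exact ⟨rfl, hExt⟩
    | 3 => exact ⟨rfl, hExt⟩
    | (m+4) =>
      rcases h : dp'.get? ((m : Int) + 4) with _ | v
      · -- key absent in dp': absent in dp0 too
        have h0 : dp0.get? ((m : Int) + 4) = none := by
          rcases hExt ((m : Int) + 4) with he | ⟨_, _, he⟩
          · rw [← he]; exact h
          · rw [he] at h; cases h
        obtain ⟨e1, x1⟩ := ih (m+3) (by omega) dp' hExt
        obtain ⟨e2, x2⟩ := ih (m+1) (by omega) _ x1
        obtain ⟨e3, x3⟩ := ih m (by omega) _ x2
        have hg : NumFactTD_gF dp0 (m+4)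
            = NumFactTD_gF dp0 (m+3) + NumFactTD_gF dp0 (m+1) + NumFactTD_gF dp0 m := by
          rw [NumFactTD_gF]; rw [h0]
        constructor
        · show (NumFactTD_goA (m+4) dp').1 = _
          rw [NumFactTD_goA]; rw [h]
          simp only [PySem.Dict.getD_insert_self]
          rw [e1, e2, e3, hg]
        · show NumFactTD_Ext dp0 (NumFactTD_goA (m+4) dp').2
          rw [NumFactTD_goA]; rw [h]
          simp only
          intro j
          by_cases hj : j = (m : Int) + 4
          · subst hj
            right
            refine ⟨h0, by omega, ?_⟩
            have ht : ((m : Int) + 4).toNat = m + 4 := by omega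
            rw [PySem.Dict.get?_insert_self, e1, e2, e3, ht, hg]
          · rw [PySem.Dict.get?_insert, if_neg hj]
            exact x3 j
      · -- key present in dp'
        have : (NumFactTD_goA (m+4) dp').1 = v ∧ (NumFactTD_goA (m+4) dp').2 = dp' := by
          rw [NumFactTD_goA]; rw [h]; exact ⟨rfl, rfl⟩
        refine ⟨?_, by rw [this.2]; exact hExt⟩
        rw [this.1]
        rcases hExt ((m : Int) + 4) with he | ⟨_, _, he⟩
        · rw [NumFactTD_gF, ← he, h]
        · rw [he] at h
          cases h
          have ht : ((m : Int) + 4).toNat = m + 4 := by omega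
          rw [ht]

-- B's foldl computes the same recurrence, four rolling values at a time.
theorem NumFactTD_foldl_spec (dp : PySem.Dict Int Int) (N : Nat) :
    (PySem.List.pyRange 4 ((4 : Int) + N) 1).foldl
      (fun (st : Int × Int × Int × Int) k =>
        let v := match dp.get? k with
                 | some x => x
                 | none => st.2.2.2 + st.2.1 + st.1
        (st.2.1, st.2.2.1, st.2.2.2, v))
      (1, 1, 1, 2)
    = (NumFactTD_gF dp N, NumFactTD_gF dp (N+1), NumFactTD_gF dp (N+2), NumFactTD_gF dp (N+3)) := by
  induction N with
  | zero =>
    rw [PySem.List.pyRange_one_eq_nil (by norm_num)]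
    rfl
  | succ m ih =>
    have hsplit : (4 : Int) + (m+1 : Nat) = ((4 : Int) + m) + 1 := by push_cast; ring
    rw [hsplit, PySem.List.pyRange_one_succ_right (by omega), List.foldl_append, ih]
    simp only [List.foldl_cons, List.foldl_nil]
    have hkey : (4 : Int) + m = ((m : Int) + 4) := by ring
    have hg4 : NumFactTD_gF dp (m+4)
        = match dp.get? ((m : Int) + 4) with
          | some x => x
          | none => NumFactTD_gF dp (m+3) + NumFactTD_gF dp (m+1) + NumFactTD_gF dp m := by
      rw [NumFactTD_gF]
    rcases h : dp.get? ((m : Int) + 4) with _ | v <;>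
      · simp only [hkey, h] at hg4 ⊢
        refine Prod.ext rfl (Prod.ext rfl (Prod.ext rfl ?_))
        simp only [hg4]
        try ring

-- ===== VERDICT (by name: the statement is the Claim_ definition above) =====
theorem NumFactTD_spec : Claim_equal_NumFactTD := by
  intro n dp _ hpre
  unfold Spec_NumFactTD NumFactTD NumFactTD_alt
  by_cases h012 : n = 0 ∨ n = 1 ∨ n = 2
  · simp [h012]
  · by_cases h3 : n = 3
    · simp [h3]
    · simp only [h012, h3, if_false]
      rcases hd : (PySem.Dict.mk dp).get? n with _ | v
      case neg.some => rfl
      have hn4 : 4 ≤ n := by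
        unfold Pre_NumFactTD at hpre
        rcases hpre with hpre | hpre
        · omega
        · exfalso
          rw [PySem.Dict.get?_eq_none_iff_not_mem_keys] at hd
          exact hd (by simpa [PySem.Dict.keys] using hpre)
      simp only [hd]
      have hN : n + 1 = (4 : Int) + ((n.toNat - 4 : Nat) + 1 : Nat) := by
        push_cast; omega
      have hEq := NumFactTD_foldl_spec (PySem.Dict.mk dp) ((n.toNat - 4) + 1)
      rw [hN, hEq]
      have h1 := NumFactTD_goA_spec (PySem.Dict.mk dp) n.toNat (PySem.Dict.mk dp)
        (fun j => Or.inl rfl)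
      rw [h1.1]
      congr 1
      omega
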